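-- pv_equiv track=rewrite | github.com/e-south/dnadesign | src/dnadesign/permuter/src/plots/position_scatter_and_heatmap.py | _order_residues_aa
-- ===== SOURCE A (Python) =====
-- AA_CAT_ORDER: list[tuple[str, list[str]]] = [
--     ("(+)", ["H", "K", "R"]),
--     ("(-)", ["D", "E"]),
--     ("Polar-neutral", ["C", "M", "N", "Q", "S", "T"]),
--     ("Non-polar", ["A", "I", "L", "V"]),
--     ("Aromatic", ["F", "W", "Y"]),
--     ("Unique", ["G", "P"]),
--     ("*", ["*"]),
-- ]
--
-- def _order_residues_aa(
--     residues: list[str],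
-- ) -> tuple[list[str], list[tuple[str, int, int]]]:
--     """
--     Return (ordered residues, spans), where spans are (category, start_idx, end_idx)
--     rows that exist *in this dataset*. Contiguity is guaranteed by construction.
--     """
--     present = set(residues)
--     ordered: list[str] = []
--     spans: list[tuple[str, int, int]] = []
--     for cat, group in AA_CAT_ORDER:
--         g = [aa for aa in group if aa in present]
--         if not g:
--             continue
--         start = len(ordered)
--         ordered.extend(g)
--         spans.append((cat, start, len(ordered) - 1))
--     # Any unexpected letters (e.g., X, U) appear at the end
--     extras = [r for r in residues if r not in set(ordered)]
--     if extras: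
--         start = len(ordered)
--         ordered.extend(sorted(extras))
--         spans.append(("Other", start, len(ordered) - 1))
--     return ordered, spans
-- ===== SOURCE B (Python) =====
-- AA_CAT_ORDER: list[tuple[str, list[str]]] = [
--     ("(+)", ["H", "K", "R"]),
--     ("(-)", ["D", "E"]),
--     ("Polar-neutral", ["C", "M", "N", "Q", "S", "T"]),
--     ("Non-polar", ["A", "I", "L", "V"]),
--     ("Aromatic", ["F", "W", "Y"]),
--     ("Unique", ["G", "P"]),
--     ("*", ["*"]),
-- ]
--
--
-- def _order_residues_aa(
--     residues: list[str],
-- ) -> tuple[list[str], list[tuple[str, int, int]]]: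
--     # Build the full ordering first, derive spans in a second scan (build-then-scan).
--     present = set(residues)
--     ordered: list[str] = []
--     for _cat, group in AA_CAT_ORDER:
--         ordered.extend(aa for aa in group if aa in present)
--     known = set(ordered)
--     ordered.extend(sorted(r for r in residues if r not in known))
--     cat_of = {aa: cat for cat, group in AA_CAT_ORDER for aa in group}
--     spans: list[tuple[str, int, int]] = []
--     for idx, aa in enumerate(ordered):
--         cat = cat_of.get(aa, "Other")
--         if spans and spans[-1][0] == cat:
--             spans[-1] = (cat, spans[-1][1], idx)
--         else:
--             spans.append((cat, idx, idx))
--     return ordered, spans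
-- ===== Notes on version B (the rewrite author's own statement) =====
-- stated objective: alternative
-- what changed: A builds the ordered residue list and its category spans in one interleaved loop; B first builds the full ordered list (filtered category groups, then sorted extras) and derives the spans in a separate second scan that merges consecutive residues of equal category via a letter-to-category dict.
import Mathlib
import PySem

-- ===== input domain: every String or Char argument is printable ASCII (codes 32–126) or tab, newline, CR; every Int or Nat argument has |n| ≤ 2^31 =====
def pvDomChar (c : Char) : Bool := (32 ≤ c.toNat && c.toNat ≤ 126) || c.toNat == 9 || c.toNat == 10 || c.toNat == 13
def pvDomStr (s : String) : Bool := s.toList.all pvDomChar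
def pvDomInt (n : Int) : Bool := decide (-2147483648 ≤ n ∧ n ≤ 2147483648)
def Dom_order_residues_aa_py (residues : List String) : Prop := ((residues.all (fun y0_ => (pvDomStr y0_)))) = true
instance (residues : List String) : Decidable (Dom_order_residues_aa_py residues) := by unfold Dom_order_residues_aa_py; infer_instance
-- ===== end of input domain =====

-- B replaces A's single interleaved build-ordered-and-spans loop by build-then-scan: it first
-- assembles the full ordered list, then derives the spans in a separate scan that merges
-- consecutive residues of equal category (looked up in a letter→category dict). Objective:
-- alternative decomposition; same asymptotic cost.

-- ===== PORT A =====
def AA_CAT_ORDER : List (String × List String) :=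
  [("(+)", ["H", "K", "R"]),
   ("(-)", ["D", "E"]),
   ("Polar-neutral", ["C", "M", "N", "Q", "S", "T"]),
   ("Non-polar", ["A", "I", "L", "V"]),
   ("Aromatic", ["F", "W", "Y"]),
   ("Unique", ["G", "P"]),
   ("*", ["*"])]

def order_residues_aa_py (residues : List String) : List String × (List (String × Int × Int)) :=
  let present : PySem.Set String := PySem.Set.ofList residues
  let st := AA_CAT_ORDER.foldl (fun st cg =>
      let g := List.filter (fun aa => PySem.Set.contains present aa) cg.2
      if g = [] then st
      else (st.1 ++ g, st.2 ++ [(cg.1, (st.1.length : Int), ((st.1 ++ g).length : Int) - 1)]))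
    ([], [])
  let extras := residues.filter (fun r => !(PySem.Set.contains (PySem.Set.ofList st.1) r))
  if extras = [] then st
  else (st.1 ++ PySem.List.sorted extras (fun x => x) false,
        st.2 ++ [("Other", (st.1.length : Int),
                  ((st.1 ++ PySem.List.sorted extras (fun x => x) false).length : Int) - 1)])

-- ===== PORT B =====
def aaCatDict : PySem.Dict String String :=
  AA_CAT_ORDER.foldl (fun d cg => cg.2.foldl (fun d aa => d.insert aa cg.1) d) PySem.Dict.empty

def spanStep (spans : List (String × Int × Int)) (p : Int × String) : List (String × Int × Int) :=
  let cat := aaCatDict.getD p.2 "Other"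
  match spans.getLast? with
  | some last => if last.1 = cat then spans.dropLast ++ [(cat, last.2.1, p.1)]
                 else spans ++ [(cat, p.1, p.1)]
  | none => spans ++ [(cat, p.1, p.1)]

def order_residues_aa_py_alt (residues : List String) : List String × (List (String × Int × Int)) :=
  let present : PySem.Set String := PySem.Set.ofList residues
  let orderedK := AA_CAT_ORDER.foldl
      (fun acc cg => acc ++ List.filter (fun aa => PySem.Set.contains present aa) cg.2) []
  let known : PySem.Set String := PySem.Set.ofList orderedK
  let ordered := orderedK ++
      PySem.List.sorted (residues.filter (fun r => !(PySem.Set.contains known r))) (fun x => x) false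
  let spans := (PySem.List.enumerate ordered 0).foldl spanStep []
  (ordered, spans)

-- ===== PRECONDITION & SPEC =====
def Spec_order_residues_aa_py (residues : List String) (out : List String × (List (String × Int × Int))) : Prop := out = order_residues_aa_py_alt residues
instance (residues : List String) (out : List String × (List (String × Int × Int))) : Decidable (Spec_order_residues_aa_py residues out) := by unfold Spec_order_residues_aa_py; infer_instance

-- ===== CLAIM (what is proved, stated in full; the proofs are below) =====
def Claim_equal_order_residues_aa_py : Prop := ∀ (residues : List String), Dom_order_residues_aa_py residues → Spec_order_residues_aa_py residues (order_residues_aa_py residues)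

-- ===== LEMMAS AND PROOFS =====

-- category of a residue letter, as B's scan computes it
def catStr (aa : String) : String := aaCatDict.getD aa "Other"

-- A's span list, described structurally over the filtered category blocks
def spansA (i : Int) : List (String × List String) → List (String × Int × Int)
  | [] => []
  | b :: bs => if b.2 = [] then spansA i bs
               else (b.1, i, i + b.2.length - 1) :: spansA (i + b.2.length) bs

lemma spansA_append (bs cs : List (String × List String)) (i : Int) :
    spansA i (bs ++ cs) = spansA i bs ++ spansA (i + ((bs.map (·.2)).flatten).length) cs := by
  induction bs generalizing i with
  | nil => simp [spansA]
  | cons b bs ih =>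
    by_cases hb : b.2 = []
    · simp [spansA, hb, ih]
    · simp only [List.cons_append, spansA, hb, ite_false, ih, List.map_cons,
        List.flatten_cons, List.length_append]
      congr 2
      push_cast
      ring_nf

-- A's interleaved loop, characterised
lemma foldA (P : String → Bool) (l : List (String × List String)) :
    ∀ (o : List String) (s : List (String × Int × Int)),
    l.foldl (fun st cg =>
      let g := List.filter P cg.2
      if g = [] then st
      else (st.1 ++ g, st.2 ++ [(cg.1, (st.1.length : Int), ((st.1 ++ g).length : Int) - 1)]))
      (o, s)
    = (o ++ ((l.map (fun cg => (cg.1, List.filter P cg.2))).map (·.2)).flatten,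
       s ++ spansA (o.length : Int) (l.map (fun cg => (cg.1, List.filter P cg.2)))) := by
  induction l with
  | nil => intro o s; simp [spansA]
  | cons b bs ih =>
    intro o s
    by_cases hb : List.filter P b.2 = []
    · simp only [List.foldl_cons, hb, if_pos, ih, List.map_cons, List.flatten_cons, spansA]
      simp
    · simp only [List.foldl_cons, hb, ite_false, ih, List.map_cons, List.flatten_cons, spansA]
      simp only [Prod.mk.injEq, List.append_assoc, List.singleton_append,
        List.length_append]
      refine ⟨trivial, ?_⟩
      push_cast
      ring_nf

-- B's build loop, characterised the same way
lemma foldB (P : String → Bool) (l : List (String × List String)) (o : List String) :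
    l.foldl (fun acc cg => acc ++ List.filter P cg.2) o
    = o ++ ((l.map (fun cg => (cg.1, List.filter P cg.2))).map (·.2)).flatten := by
  induction l generalizing o with
  | nil => simp
  | cons b bs ih => simp [ih]

-- every letter of a category group has that category
lemma catStr_mem : ∀ cg ∈ AA_CAT_ORDER, ∀ aa ∈ cg.2, catStr aa = cg.1 := by decide

-- a string that is none of the 21 known letters gets category "Other"
lemma catStr_not_mem (aa : String) (h : aa ∉ ((AA_CAT_ORDER.map (·.2)).flatten)) :
    catStr aa = "Other" := by
  simp only [show (AA_CAT_ORDER.map (·.2)).flatten =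
    ["H","K","R","D","E","C","M","N","Q","S","T","A","I","L","V","F","W","Y","G","P","*"] from rfl,
    List.mem_cons, List.not_mem_nil, or_false, not_or] at h
  obtain ⟨h1,h2,h3,h4,h5,h6,h7,h8,h9,h10,h11,h12,h13,h14,h15,h16,h17,h18,h19,h20,h21⟩ := h
  simp [catStr, show aaCatDict = PySem.Dict.mk
    [("H","(+)"),("K","(+)"),("R","(+)"),("D","(-)"),("E","(-)"),
     ("C","Polar-neutral"),("M","Polar-neutral"),("N","Polar-neutral"),("Q","Polar-neutral"),
     ("S","Polar-neutral"),("T","Polar-neutral"),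
     ("A","Non-polar"),("I","Non-polar"),("L","Non-polar"),("V","Non-polar"),
     ("F","Aromatic"),("W","Aromatic"),("Y","Aromatic"),
     ("G","Unique"),("P","Unique"),("*","*")] by decide,
    PySem.Dict.getD, PySem.Dict.get?, beq_iff_eq,
    Ne.symm h1, Ne.symm h2, Ne.symm h3, Ne.symm h4, Ne.symm h5, Ne.symm h6, Ne.symm h7,
    Ne.symm h8, Ne.symm h9, Ne.symm h10, Ne.symm h11, Ne.symm h12, Ne.symm h13, Ne.symm h14,
    Ne.symm h15, Ne.symm h16, Ne.symm h17, Ne.symm h18, Ne.symm h19, Ne.symm h20, Ne.symm h21]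

-- B's scan absorbs a run that continues the open span
lemma scan_run (g : List String) (c : String) :
    ∀ (i : Int) (S' : List (String × Int × Int)) (a : Int),
    (∀ aa ∈ g, catStr aa = c) →
    (PySem.List.enumerate g (i + 1)).foldl spanStep (S' ++ [(c, a, i)])
      = S' ++ [(c, a, i + g.length)] := by
  induction g with
  | nil => intro i S' a _; simp [PySem.List.enumerate_nil]
  | cons aa g ih =>
    intro i S' a hcat
    rw [PySem.List.enumerate_cons, List.foldl_cons]
    have hstep : spanStep (S' ++ [(c, a, i)]) (i + 1, aa)
        = S' ++ [(c, a, i + 1)] := by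
      have hc : catStr aa = c := hcat aa (by simp)
      simp [spanStep, catStr] at hc ⊢
      simp [hc]
    rw [hstep]
    rw [ih (i + 1) S' a (fun x hx => hcat x (by simp [hx]))]
    simp only [List.length_cons]
    push_cast
    ring_nf

-- B's scan turns one homogeneous block into one span
lemma scan_block (g : List String) (c : String) (i : Int) (S : List (String × Int × Int))
    (hne : g ≠ []) (hcat : ∀ aa ∈ g, catStr aa = c)
    (hlast : ∀ l, S.getLast? = some l → l.1 ≠ c) :
    (PySem.List.enumerate g i).foldl spanStep S = S ++ [(c, i, i + g.length - 1)] := by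
  obtain ⟨aa, g, rfl⟩ := List.exists_cons_of_ne_nil hne
  rw [PySem.List.enumerate_cons, List.foldl_cons]
  have hc : catStr aa = c := hcat aa (by simp)
  have hstep : spanStep S (i, aa) = S ++ [(c, i, i)] := by
    simp only [spanStep, catStr] at hc ⊢
    rw [hc]
    match hS : S.getLast? with
    | none => simp
    | some l =>
      have : ¬ (l.1 = c) := hlast l hS
      simp [this]
  rw [hstep, scan_run g c i S i (fun x hx => hcat x (by simp [hx]))]
  simp only [List.length_cons]
  push_cast
  ring_nf

-- B's scan over a concatenation of homogeneous blocks with pairwise-distinct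
-- categories produces exactly A's span list
lemma scan_blocks (bs : List (String × List String)) :
    ∀ (i : Int) (S : List (String × Int × Int)),
    (∀ b ∈ bs, ∀ aa ∈ b.2, catStr aa = b.1) →
    (bs.map (·.1)).Nodup →
    (∀ l, S.getLast? = some l → l.1 ∉ bs.map (·.1)) →
    (PySem.List.enumerate ((bs.map (·.2)).flatten) i).foldl spanStep S = S ++ spansA i bs := by
  induction bs with
  | nil => intro i S _ _ _; simp [PySem.List.enumerate_nil, spansA]
  | cons b bs ih =>
    intro i S hcat hnd hlast
    rw [List.map_cons, List.nodup_cons] at hnd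
    rw [List.map_cons, List.flatten_cons, PySem.List.enumerate_append, List.foldl_append]
    by_cases hb : b.2 = []
    · rw [hb]
      simp only [PySem.List.enumerate_nil, List.foldl_nil, List.length_nil, Nat.cast_zero,
        add_zero]
      rw [ih i S (fun x hx => hcat x (by simp [hx])) hnd.2
        (fun l hl hm => hlast l hl (by rw [List.map_cons]; exact List.mem_cons_of_mem _ hm))]
      simp [spansA, hb]
    · rw [scan_block b.2 b.1 i S hb (hcat b (by simp))
        (fun l hl hc => hlast l hl (by rw [List.map_cons, hc]; exact List.mem_cons_self ..))]
      rw [ih (i + b.2.length) (S ++ [(b.1, i, i + b.2.length - 1)])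
        (fun x hx => hcat x (by simp [hx])) hnd.2
        (fun l hl => by
          rw [List.getLast?_concat] at hl
          obtain rfl : (b.1, i, i + (b.2.length : Int) - 1) = l := by injection hl
          exact hnd.1)]
      simp [spansA, hb]

-- ===== VERDICT (by name: the statement is the Claim_ definition above) =====
theorem order_residues_aa_py_spec : Claim_equal_order_residues_aa_py := by
  intro residues _
  unfold Spec_order_residues_aa_py order_residues_aa_py order_residues_aa_py_alt
  simp only [foldA, foldB, List.nil_append, List.length_nil, Nat.cast_zero]
  set P : String → Bool := fun aa => PySem.Set.contains (PySem.Set.ofList residues) aa with hP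
  set blocks7 : List (String × List String) :=
    AA_CAT_ORDER.map (fun cg => (cg.1, List.filter P cg.2)) with hblocks7
  set orderedK : List String := ((blocks7.map (·.2)).flatten) with horderedK
  set extras : List String :=
    residues.filter (fun r => !(PySem.Set.contains (PySem.Set.ofList orderedK) r)) with hextras
  set ex : List String := PySem.List.sorted extras (fun x => x) false with hex
  -- extras contain no known letter
  have hexOther : ∀ aa ∈ ex, catStr aa = "Other" := by
    intro aa ha
    rw [hex, PySem.List.mem_sorted, hextras, List.mem_filter] at ha
    obtain ⟨hres, hnk⟩ := ha
    apply catStr_not_mem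
    intro hin
    rw [List.mem_flatten] at hin
    obtain ⟨gl, hgl, hag⟩ := hin
    rw [List.mem_map] at hgl
    obtain ⟨cg, hcg, rfl⟩ := hgl
    have hPa : P aa = true := by
      rw [hP]
      exact (PySem.Set.contains_iff _ _).mpr ((PySem.Set.mem_ofList _ _).mpr hres)
    have haok : aa ∈ orderedK := by
      rw [horderedK, List.mem_flatten]
      refine ⟨List.filter P cg.2, ?_, List.mem_filter.mpr ⟨hag, hPa⟩⟩
      rw [List.mem_map]
      exact ⟨(cg.1, List.filter P cg.2), by rw [hblocks7, List.mem_map]; exact ⟨cg, hcg, rfl⟩, rfl⟩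
    rw [(PySem.Set.contains_iff _ _).mpr ((PySem.Set.mem_ofList _ _).mpr haok)] at hnk
    simp at hnk
  -- B's scan over the eight blocks yields A's spans
  have hscan : (PySem.List.enumerate (orderedK ++ ex) 0).foldl spanStep []
      = spansA 0 (blocks7 ++ [("Other", ex)]) := by
    have h1 : (((blocks7 ++ [("Other", ex)]).map (·.2)).flatten) = orderedK ++ ex := by
      simp [horderedK]
    have h2 := scan_blocks (blocks7 ++ [("Other", ex)]) 0 []
      (by
        intro b hb aa ha
        rw [List.mem_append] at hb
        rcases hb with hb | hb
        · rw [hblocks7, List.mem_map] at hb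
          obtain ⟨cg, hcg, rfl⟩ := hb
          exact catStr_mem cg hcg aa (List.mem_of_mem_filter ha)
        · simp only [List.mem_singleton] at hb
          subst hb
          exact hexOther aa ha)
      (by
        have : (blocks7 ++ [("Other", ex)]).map (·.1)
            = AA_CAT_ORDER.map (·.1) ++ ["Other"] := by
          simp [hblocks7]
        rw [this]
        decide)
      (by simp)
    rw [h1] at h2
    simpa using h2
    -- put both sides in the same shape
  rw [hscan, spansA_append]
  by_cases hE : extras = []
  · have hexnil : ex = [] := by rw [hex, hE]; rfl
    rw [if_pos hE, hexnil]
    simp [spansA]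
  · have hexne : ex ≠ [] := by
      intro hnil
      have := (PySem.List.sorted_perm extras (fun x => x) false).length_eq
      rw [← hex, hnil] at this
      exact hE (List.eq_nil_of_length_eq_zero this.symm)
    rw [if_neg hE]
    simp only [Prod.mk.injEq, spansA, hexne, ite_false]
    refine ⟨trivial, ?_⟩
    rw [← horderedK]
    simp only [List.length_append, List.cons.injEq, Prod.mk.injEq, List.append_cancel_left_eq]
    refine ⟨⟨trivial, by ring, by push_cast; ring⟩, trivial⟩
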